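-- pv_equiv track=rewrite | github.com/aymenazzahidi/Python | Analyseurdetexte.py | phrases_plus_longues
-- ===== SOURCE A (Python) =====
-- import string
--
-- def nettoyer_texte(texte):
--     texte_nettoye = ""
--     for c in texte:
--         if c not in string.punctuation:
--             texte_nettoye += c
--     return texte_nettoye.lower()
--
-- def separer_mots(texte):
--     texte = nettoyer_texte(texte)
--     return texte.split()
--
-- def phrases_plus_longues(phrases):
--     max_len = 0
--     for p in phrases:
--         n = len(separer_mots(p))
--         if n > max_len:
--             max_len = n
--     longues = []
--     for p in phrases:
--         if len(separer_mots(p)) == max_len: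
--             longues.append(p)
--     return longues
-- ===== SOURCE B (Python) =====
-- import string
--
-- _PUNCT = set(string.punctuation)
--
-- def _nb_mots(p):
--     return len(''.join(c for c in p if c not in _PUNCT).lower().split())
--
-- def phrases_plus_longues(phrases):
--     # single pass: keep the best word count and the current winners together
--     best = 0
--     winners = []
--     for p in phrases:
--         n = _nb_mots(p)
--         if n > best:
--             best, winners = n, [p]
--         elif n == best:
--             winners.append(p)
--     return winners
-- ===== Notes on version B (the rewrite author's own statement) =====
-- stated objective: simpler
-- what changed: B replaces A's two independent scans (each recomputing the word count per phrase) by one single pass that keeps the running maximum together with the current list of winners, resetting the list when a larger count appears.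
import Mathlib
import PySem

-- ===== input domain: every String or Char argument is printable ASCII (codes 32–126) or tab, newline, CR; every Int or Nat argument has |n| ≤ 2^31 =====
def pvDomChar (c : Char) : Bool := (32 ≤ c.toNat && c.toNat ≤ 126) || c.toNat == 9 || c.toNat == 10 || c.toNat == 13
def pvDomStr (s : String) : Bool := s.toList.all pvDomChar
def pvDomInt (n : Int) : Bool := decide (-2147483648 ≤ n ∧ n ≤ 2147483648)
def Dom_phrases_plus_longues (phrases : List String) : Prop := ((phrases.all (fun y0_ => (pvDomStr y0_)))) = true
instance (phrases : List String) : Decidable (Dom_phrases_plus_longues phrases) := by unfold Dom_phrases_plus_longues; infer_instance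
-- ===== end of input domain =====

-- B: one single pass keeping the running maximum word count together with the current winners,
-- instead of A's two scans each recomputing the word count; return values proved equal on Dom.


-- ===== PORT A =====
-- string.punctuation
def pvPunct : List Char := "!\"#$%&'()*+,-./:;<=>?@[\\]^_`{|}~".toList

def nettoyer_texte (texte : String) : String :=
  let texte_nettoye :=
    texte.toList.foldl
      (fun acc c => if pvPunct.contains c then acc else acc ++ [c]) ([] : List Char)
  PySem.Str.lower (String.mk texte_nettoye)

def separer_mots (texte : String) : List String :=
  PySem.Str.split₀ (nettoyer_texte texte)

def phrases_plus_longues (phrases : List String) : List String :=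
  let max_len :=
    phrases.foldl
      (fun max_len p =>
        let n := (separer_mots p).length
        if n > max_len then n else max_len) 0
  phrases.foldl
    (fun longues p =>
      if (separer_mots p).length == max_len then longues ++ [p] else longues) []

-- ===== PORT B =====
def pvNbMots (p : String) : Nat :=
  (PySem.Str.split₀ (PySem.Str.lower
    (String.mk (p.toList.filter (fun c => !pvPunct.contains c))))).length

def phrases_plus_longues_alt (phrases : List String) : List String :=
  (phrases.foldl
    (fun (st : Nat × List String) p =>
      let n := pvNbMots p
      if n > st.1 then (n, [p])
      else if n == st.1 then (st.1, st.2 ++ [p])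
      else st)
    (0, ([] : List String))).2

-- ===== PRECONDITION & SPEC =====
def Spec_phrases_plus_longues (phrases : List String) (out : List String) : Prop := out = phrases_plus_longues_alt phrases
instance (phrases : List String) (out : List String) : Decidable (Spec_phrases_plus_longues phrases out) := by unfold Spec_phrases_plus_longues; infer_instance

-- ===== CLAIM (what is proved, stated in full; the proofs are below) =====
def Claim_equal_phrases_plus_longues : Prop := ∀ (phrases : List String), Dom_phrases_plus_longues phrases → Spec_phrases_plus_longues phrases (phrases_plus_longues phrases)

-- ===== LEMMAS AND PROOFS =====

-- A's char-by-char rebuild skipping punctuation is a filter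
theorem foldl_skip (l : List Char) (acc : List Char) :
    l.foldl (fun acc c => if pvPunct.contains c then acc else acc ++ [c]) acc
      = acc ++ l.filter (fun c => !pvPunct.contains c) := by
  induction l generalizing acc with
  | nil => simp
  | cons c l ih =>
    rw [List.foldl_cons, ih, List.filter_cons]
    by_cases h : c ∈ pvPunct <;> simp [h]

-- the two word counts agree
theorem count_eq (p : String) : (separer_mots p).length = pvNbMots p := by
  simp only [separer_mots, nettoyer_texte, pvNbMots, foldl_skip, List.nil_append]

-- A's max loop is a foldl of max
theorem maxstep_eq (f : String → Nat) (l : List String) (b : Nat) :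
    l.foldl (fun m p => if f p > m then f p else m) b = l.foldl (fun m p => max m (f p)) b := by
  induction l generalizing b with
  | nil => rfl
  | cons p l ih =>
    have h : (if f p > b then f p else b) = max b (f p) := by
      by_cases h : f p > b <;> simp [h] <;> omega
    rw [List.foldl_cons, List.foldl_cons, h, ih]

theorem le_foldl_max (f : String → Nat) (l : List String) (b : Nat) :
    b ≤ l.foldl (fun m p => max m (f p)) b := by
  induction l generalizing b with
  | nil => simp
  | cons p l ih => exact le_trans (le_max_left _ _) (ih _)

-- the one-pass fold: final state is (overall max, winners of the whole list)
theorem onepass (f : String → Nat) (l : List String) (b : Nat) (acc : List String) :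
    l.foldl
      (fun (st : Nat × List String) p =>
        let n := f p
        if n > st.1 then (n, [p])
        else if n == st.1 then (st.1, st.2 ++ [p])
        else st)
      (b, acc)
    = (l.foldl (fun m p => max m (f p)) b,
       (if l.foldl (fun m p => max m (f p)) b = b then acc else []) ++
         l.filter (fun p => f p == l.foldl (fun m p => max m (f p)) b)) := by
  induction l generalizing b acc with
  | nil => simp
  | cons p l ih =>
    simp only [List.foldl_cons, List.filter_cons]
    by_cases h1 : f p > b
    · have hgt : max b (f p) = f p := by omega
      simp only [h1, if_pos, ih, hgt]
      have hM : f p ≤ l.foldl (fun m p => max m (f p)) (f p) := le_foldl_max f l (f p)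
      have hMb : ¬ l.foldl (fun m p => max m (f p)) (f p) = b := by omega
      by_cases h2 : f p = l.foldl (fun m q => max m (f q)) (f p)
      · have hne : ¬ (f p = b) := by omega
        simp [← h2, hne]
      · have hb : (f p == l.foldl (fun m q => max m (f q)) (f p)) = false := by simp [h2]
        have h2' : ¬ (l.foldl (fun m q => max m (f q)) (f p) = f p) := fun h => h2 h.symm
        simp [hMb, hb, h2']
    · by_cases h2 : f p = b
      · have hmax : max b (f p) = b := by omega
        simp only [h1, if_neg, h2, beq_self_eq_true, if_pos, ih, hmax]
        by_cases h3 : l.foldl (fun m p => max m (f p)) b = b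
        · simp [h3, h2]
        · have hb : (f p == l.foldl (fun m q => max m (f q)) b) = false := by
            simp only [beq_eq_false_iff_ne, ne_eq, h2]
            exact fun h => h3 h.symm
          have h3' : ¬ (b = l.foldl (fun m p => max m (f p)) b) := fun h => h3 h.symm
          simp [h3, hb, h3']
      · have hmax : max b (f p) = b := by omega
        have hne : (f p == b) = false := by simp [h2]
        simp only [h1, if_neg, hne, ih, hmax]
        by_cases h3 : l.foldl (fun m p => max m (f p)) b = b
        · have hb : (f p == l.foldl (fun m q => max m (f q)) b) = false := by rw [h3]; exact hne
          simp [h3, hb, h2]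
        · have hb : (f p == l.foldl (fun m q => max m (f q)) b) = false := by
            simp only [beq_eq_false_iff_ne, ne_eq]
            have := le_foldl_max f l b; omega
          simp [h3, hb]

-- ===== VERDICT (by name: the statement is the Claim_ definition above) =====
theorem phrases_plus_longues_spec : Claim_equal_phrases_plus_longues := by
  intro phrases _
  unfold Spec_phrases_plus_longues phrases_plus_longues phrases_plus_longues_alt
  simp only [count_eq, onepass, maxstep_eq]
  rw [PySem.List.foldl_append_if_eq_filter]
  by_cases h : phrases.foldl (fun m p => max m (pvNbMots p)) 0 = 0 <;> simp [h]
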